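-- pv_equiv track=rewrite | github.com/edumgt/Python-AI_Agent-Class | pyBasics/class013/class013_example1.py | bounded_scan
-- ===== SOURCE A (Python) =====
-- def bounded_scan(values, stop_at):
--     accepted = []
--     idx = 0
--     while idx < len(values):
--         current = values[idx]
--         idx += 1
--         if current < 0:
--             continue
--         if current >= stop_at:
--             break
--         accepted.append(current)
--     return accepted
-- ===== SOURCE B (Python) =====
-- def bounded_scan(values, stop_at):
--     idx = next((i for i, v in enumerate(values) if v >= 0 and v >= stop_at), len(values))
--     return [v for v in values[:idx] if v >= 0]
-- ===== Notes on version B (the rewrite author's own statement) =====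
-- stated objective: alternative
-- what changed: Replaces the fused scan-and-break accumulator loop with two passes: first locate the stopping boundary (first non-negative value >= stop_at), then filter the non-negatives out of the prefix before that boundary.
import Mathlib
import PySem

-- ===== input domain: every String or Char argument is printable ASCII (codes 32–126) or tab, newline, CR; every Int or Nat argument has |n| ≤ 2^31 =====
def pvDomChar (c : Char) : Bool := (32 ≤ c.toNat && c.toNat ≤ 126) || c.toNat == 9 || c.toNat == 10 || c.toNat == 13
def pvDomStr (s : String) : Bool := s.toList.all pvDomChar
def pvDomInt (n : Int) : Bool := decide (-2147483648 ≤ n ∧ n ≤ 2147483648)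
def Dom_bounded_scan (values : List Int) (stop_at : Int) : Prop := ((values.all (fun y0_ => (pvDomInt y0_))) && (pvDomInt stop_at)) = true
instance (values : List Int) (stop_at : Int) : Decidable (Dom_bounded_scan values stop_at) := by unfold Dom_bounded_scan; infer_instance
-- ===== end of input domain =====

-- B replaces A's fused scan-and-break accumulator loop by boundary-finding + prefix filter (alternative decomposition, same cost).

-- ===== PORT A =====
-- A's while loop over values with an 'accepted' accumulator, appended at the back as Python does.
def bsLoopA (values : List Int) (stop_at : Int) (accepted : List Int) : List Int :=
  match values with
  | [] => accepted
  | current :: rest =>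
      if current < 0 then bsLoopA rest stop_at accepted
      else if current ≥ stop_at then accepted
      else bsLoopA rest stop_at (accepted ++ [current])

def bounded_scan (values : List Int) (stop_at : Int) : List Int :=
  bsLoopA values stop_at []

-- ===== PORT B =====
-- the generator 'next((i for i,v in enumerate(values) if v >= 0 and v >= stop_at), len(values))'
def bsBoundary (values : List Int) (stop_at : Int) : Nat :=
  match values with
  | [] => 0
  | v :: rest => if 0 ≤ v ∧ stop_at ≤ v then 0 else bsBoundary rest stop_at + 1

def bounded_scan_alt (values : List Int) (stop_at : Int) : List Int :=
  -- values[:idx] with 0 ≤ idx ≤ len values is List.take idx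
  (values.take (bsBoundary values stop_at)).filter (fun v => decide (0 ≤ v))

-- ===== PRECONDITION & SPEC =====
def Spec_bounded_scan (values : List Int) (stop_at : Int) (out : List Int) : Prop := out = bounded_scan_alt values stop_at
instance (values : List Int) (stop_at : Int) (out : List Int) : Decidable (Spec_bounded_scan values stop_at out) := by unfold Spec_bounded_scan; infer_instance

-- ===== CLAIM (what is proved, stated in full; the proofs are below) =====
def Claim_equal_bounded_scan : Prop := ∀ (values : List Int) (stop_at : Int), Dom_bounded_scan values stop_at → Spec_bounded_scan values stop_at (bounded_scan values stop_at)

-- ===== LEMMAS AND PROOFS =====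
theorem bsLoopA_eq (stop_at : Int) :
    ∀ (values accepted : List Int),
      bsLoopA values stop_at accepted
        = accepted ++ (values.take (bsBoundary values stop_at)).filter (fun v => decide (0 ≤ v)) := by
  intro values
  induction values with
  | nil => intro acc; simp [bsLoopA, bsBoundary]
  | cons v rest ih =>
      intro acc
      by_cases hneg : v < 0
      · have hp : ¬ (0 ≤ v ∧ stop_at ≤ v) := by omega
        simp [bsLoopA, bsBoundary, hneg, ih, show ¬ (0 ≤ v) by omega]
      · by_cases hstop : v ≥ stop_at
        · have hp : (0 ≤ v ∧ stop_at ≤ v) := by omega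
          simp [bsLoopA, bsBoundary, hneg, hstop, hp]
        · have hp : ¬ (0 ≤ v ∧ stop_at ≤ v) := by omega
          simp [bsLoopA, bsBoundary, hneg, hstop, ih,
                show (0 ≤ v) by omega]

-- ===== VERDICT (by name: the statement is the Claim_ definition above) =====
theorem bounded_scan_spec : Claim_equal_bounded_scan := by
  intro values stop_at _
  unfold Spec_bounded_scan bounded_scan bounded_scan_alt
  simpa using bsLoopA_eq stop_at values []
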